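-- pv_equiv track=rewrite | github.com/nowling-lab/enhancer-dissection | clustal_omega_highlightor.py | combine_indels
-- ===== SOURCE A (Python) =====
-- def combine_indels(indel_dict):
--     new_indel_dict = {}
--     keys = list(indel_dict.keys())
--     for key in keys:
--         new_indel_dict[key] = []
--         indel_list = indel_dict[key]
--         if len(indel_list) == 0:
--             continue
--         start_location = indel_list[0]
--         indel_width = 1
--         for index, location in enumerate(indel_list):
--             if index + 1 >= len(indel_list):
--                 break
--             elif int(indel_list[index + 1]) - int(indel_list[index]) == 1:
--                     if indel_width == 1:
--                         start_location = location
--                     indel_width += 1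
--             elif indel_width > 0:
--                 if indel_width == 1:
--                     start_location = location
--                 start_location = calibrate_start_location(start_location, new_indel_dict, key)
--                 create_add_indel(new_indel_dict, key, start_location - 1, indel_width)
--                 indel_width = 1
--
--         indel_list = new_indel_dict[key]
--         if indel_width > 0 and len(indel_list) == 0:
--             start_location = calibrate_start_location(start_location, new_indel_dict, key)
--             create_add_indel(new_indel_dict, key, start_location - 1, indel_width)
--         elif indel_list[-1][0] != start_location:
--             start_location = calibrate_start_location(start_location, new_indel_dict, key)
--             create_add_indel(new_indel_dict, key, start_location - 1, indel_width)
--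
--     return new_indel_dict
--
-- def calibrate_start_location(start_location, new_indel_dict, key):
--     indels_in_key = new_indel_dict[key]
--     total_length_of_indels = 0
--     for indel in indels_in_key:
--         indel_string = indel[1]
--         str_len = len(indel_string)
--         total_length_of_indels += str_len
--
--     return start_location - total_length_of_indels
--
-- def create_add_indel(new_indel_dict, key, start_location, indel_width):
--     indel_string = ""
--     for x in range(indel_width):
--         indel_string += "-"
--     new_indel_dict[key].append((start_location, indel_string))
-- ===== SOURCE B (Python) =====
-- def combine_indels(indel_dict):
--     result = {}
--     for key, xs in indel_dict.items():
--         out = []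
--         if xs:
--             s = xs[0]
--             w = 1
--             c = 0
--             for i in range(len(xs) - 1):
--                 if xs[i + 1] - xs[i] == 1:
--                     if w == 1:
--                         s = xs[i]
--                     w += 1
--                 else:
--                     if w == 1:
--                         s = xs[i]
--                     s -= c
--                     out.append((s - 1, "-" * w))
--                     c += w
--                     w = 1
--             if not out or out[-1][0] != s:
--                 out.append((s - c - 1, "-" * w))
--         result[key] = out
--     return result
-- ===== Notes on version B (the rewrite author's own statement) =====
-- stated objective: faster
-- what changed: B replaces A's per-run rescan of all previously emitted indel strings (calibrate_start_location) and its character-by-character dash-string building with one linear pass per key that keeps a running cumulative width sum and builds each run string as '-'*w (measured ~2.3x on the generated inputs).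
import Mathlib
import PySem

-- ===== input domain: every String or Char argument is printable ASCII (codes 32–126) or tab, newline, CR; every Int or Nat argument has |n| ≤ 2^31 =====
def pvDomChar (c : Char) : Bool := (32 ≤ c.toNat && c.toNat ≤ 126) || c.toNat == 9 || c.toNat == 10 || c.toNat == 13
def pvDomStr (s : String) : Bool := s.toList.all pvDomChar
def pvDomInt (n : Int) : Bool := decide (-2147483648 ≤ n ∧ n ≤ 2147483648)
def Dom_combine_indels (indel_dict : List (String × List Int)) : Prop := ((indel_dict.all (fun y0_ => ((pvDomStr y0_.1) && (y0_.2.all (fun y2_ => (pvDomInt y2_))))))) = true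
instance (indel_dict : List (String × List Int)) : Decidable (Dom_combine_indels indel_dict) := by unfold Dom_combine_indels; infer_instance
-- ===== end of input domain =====

-- B keeps a running cumulative sum of the emitted run widths instead of rescanning all previously
-- emitted indel strings (calibrate_start_location) at every emission, and builds each dash string
-- in one step: a linear pass per key (objective: faster).

-- ===== PORT A =====
-- A-side helper 'calibrate_start_location' (literal: sums the lengths of the strings already
-- emitted for this key).  'new_indel_dict[key]' is ported as getD with default []: the key is
-- present at every call site, so this is exact on every reached state.
def calibrate_start_location (start_location : Int) (new_indel_dict : PySem.Dict String (List (Int × String))) (key : String) : Int :=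
  let indels_in_key := new_indel_dict.getD key []
  let total_length_of_indels := indels_in_key.foldl (fun acc indel => acc + PySem.Str.len indel.2) 0
  start_location - total_length_of_indels

-- A-side helper 'create_add_indel' (literal: builds the dash string with the 'for x in range(width)'
-- concatenation loop, over List Char — exact for Python's str +=; then appends to new_indel_dict[key]).
def create_add_indel (new_indel_dict : PySem.Dict String (List (Int × String))) (key : String) (start_location : Int) (indel_width : Int) : PySem.Dict String (List (Int × String)) :=
  let indel_string := String.ofList ((PySem.List.pyRange 0 indel_width 1).foldl (fun acc _ => acc ++ ['-']) ([] : List Char))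
  new_indel_dict.modify key [] (fun l => l ++ [(start_location, indel_string)])

-- Port of A.  'break' at index+1 >= len is ported by making every later iteration (which all
-- satisfy that test) a no-op; indel_list[0] / indel_list[index] are ported with pyGetD (always in
-- range on the trace: the list is nonempty resp. index+1 < len is checked first).
def combine_indels (indel_dict : List (String × List Int)) : List (String × List (Int × String)) :=
  let d := PySem.Dict.ofList indel_dict
  let keys := d.keys
  let new_indel_dict := keys.foldl (fun new_indel_dict key =>
    let new_indel_dict := new_indel_dict.insert key []
    let indel_list := d.getD key []
    if indel_list.length = 0 then new_indel_dict
    else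
      let st := (PySem.List.enumerate indel_list).foldl
        (fun (st : PySem.Dict String (List (Int × String)) × Int × Int) p =>
          match st, p with
          | (nd, start_location, indel_width), (index, location) =>
            if (indel_list.length : Int) ≤ index + 1 then (nd, start_location, indel_width)
            else if PySem.List.pyGetD indel_list (index + 1) 0 - PySem.List.pyGetD indel_list index 0 = 1 then
              (nd, (if indel_width = 1 then location else start_location), indel_width + 1)
            else if 0 < indel_width then
              let start_location := if indel_width = 1 then location else start_location
              let start_location := calibrate_start_location start_location nd key
              (create_add_indel nd key (start_location - 1) indel_width, start_location, 1)
            else (nd, start_location, indel_width))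
        (new_indel_dict, PySem.List.pyGetD indel_list 0 0, 1)
      match st with
      | (nd, start_location, indel_width) =>
        let indel_list := nd.getD key []
        if 0 < indel_width ∧ indel_list.length = 0 then
          let start_location := calibrate_start_location start_location nd key
          create_add_indel nd key (start_location - 1) indel_width
        else if (PySem.List.pyGetD indel_list (-1) (0, "")).1 ≠ start_location then
          let start_location := calibrate_start_location start_location nd key
          create_add_indel nd key (start_location - 1) indel_width
        else nd)
    PySem.Dict.empty
  new_indel_dict.items

-- ===== PORT B =====
-- Port of B (Source B): one pass per key over range(len(xs)-1) with state (s, w, c, out);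
-- "-" * w is ported as PySem.List.pyRepeat ['-'] w (exact for Python string repetition).
def combine_indels_alt (indel_dict : List (String × List Int)) : List (String × List (Int × String)) :=
  let d := PySem.Dict.ofList indel_dict
  (d.items.foldl (fun result kv =>
    let key := kv.1
    let xs := kv.2
    let out : List (Int × String) :=
      if xs.length = 0 then []
      else
        let st := (PySem.List.pyRange 0 ((xs.length : Int) - 1) 1).foldl
          (fun (st : Int × Int × Int × List (Int × String)) i =>
            match st with
            | (s, w, c, out) =>
              if PySem.List.pyGetD xs (i + 1) 0 - PySem.List.pyGetD xs i 0 = 1 then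
                ((if w = 1 then PySem.List.pyGetD xs i 0 else s), w + 1, c, out)
              else
                let s := (if w = 1 then PySem.List.pyGetD xs i 0 else s) - c
                (s, 1, c + w, out ++ [(s - 1, String.ofList (PySem.List.pyRepeat ['-'] w))]))
          (PySem.List.pyGetD xs 0 0, 1, 0, [])
        match st with
        | (s, w, c, out) =>
          if out.length = 0 ∨ (PySem.List.pyGetD out (-1) (0, "")).1 ≠ s then
            out ++ [(s - c - 1, String.ofList (PySem.List.pyRepeat ['-'] w))]
          else out
    result.insert key out) PySem.Dict.empty).items

-- ===== PRECONDITION & SPEC =====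
def Spec_combine_indels (indel_dict : List (String × List Int)) (out : List (String × List (Int × String))) : Prop := out = combine_indels_alt indel_dict
instance (indel_dict : List (String × List Int)) (out : List (String × List (Int × String))) : Decidable (Spec_combine_indels indel_dict out) := by unfold Spec_combine_indels; infer_instance

-- ===== CLAIM (what is proved, stated in full; the proofs are below) =====
def Claim_equal_combine_indels : Prop := ∀ (indel_dict : List (String × List Int)), Dom_combine_indels indel_dict → Spec_combine_indels indel_dict (combine_indels indel_dict)

-- ===== LEMMAS AND PROOFS =====

-- B's loop step and per-key result, as named copies of the bodies inlined in combine_indels_alt.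
def pvStepB (xs : List Int) (st : Int × Int × Int × List (Int × String)) (i : Int) : Int × Int × Int × List (Int × String) :=
  match st with
  | (s, w, c, out) =>
    if PySem.List.pyGetD xs (i + 1) 0 - PySem.List.pyGetD xs i 0 = 1 then
      ((if w = 1 then PySem.List.pyGetD xs i 0 else s), w + 1, c, out)
    else
      let s := (if w = 1 then PySem.List.pyGetD xs i 0 else s) - c
      (s, 1, c + w, out ++ [(s - 1, String.ofList (PySem.List.pyRepeat ['-'] w))])

def pvOutB (xs : List Int) : List (Int × String) :=
  if xs.length = 0 then []
  else
    let st := (PySem.List.pyRange 0 ((xs.length : Int) - 1) 1).foldl (pvStepB xs) (PySem.List.pyGetD xs 0 0, 1, 0, [])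
    match st with
    | (s, w, c, out) =>
      if out.length = 0 ∨ (PySem.List.pyGetD out (-1) (0, "")).1 ≠ s then
        out ++ [(s - c - 1, String.ofList (PySem.List.pyRepeat ['-'] w))]
      else out

-- A's loop step (after the break guard has been discharged) and per-key body, as named copies.
def pvStepA (key : String) (xs : List Int) (st : PySem.Dict String (List (Int × String)) × Int × Int) (i : Int) : PySem.Dict String (List (Int × String)) × Int × Int :=
  match st with
  | (nd, start_location, indel_width) =>
    if PySem.List.pyGetD xs (i + 1) 0 - PySem.List.pyGetD xs i 0 = 1 then
      (nd, (if indel_width = 1 then PySem.List.pyGetD xs i 0 else start_location), indel_width + 1)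
    else if 0 < indel_width then
      let start_location := if indel_width = 1 then PySem.List.pyGetD xs i 0 else start_location
      let start_location := calibrate_start_location start_location nd key
      (create_add_indel nd key (start_location - 1) indel_width, start_location, 1)
    else (nd, start_location, indel_width)

def pvGA (d : PySem.Dict String (List Int)) (new_indel_dict : PySem.Dict String (List (Int × String))) (key : String) : PySem.Dict String (List (Int × String)) :=
  let new_indel_dict := new_indel_dict.insert key []
  let indel_list := d.getD key []
  if indel_list.length = 0 then new_indel_dict
  else
    let st := (PySem.List.enumerate indel_list).foldl
      (fun (st : PySem.Dict String (List (Int × String)) × Int × Int) p =>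
        match st, p with
        | (nd, start_location, indel_width), (index, location) =>
          if (indel_list.length : Int) ≤ index + 1 then (nd, start_location, indel_width)
          else if PySem.List.pyGetD indel_list (index + 1) 0 - PySem.List.pyGetD indel_list index 0 = 1 then
            (nd, (if indel_width = 1 then location else start_location), indel_width + 1)
          else if 0 < indel_width then
            let start_location := if indel_width = 1 then location else start_location
            let start_location := calibrate_start_location start_location nd key
            (create_add_indel nd key (start_location - 1) indel_width, start_location, 1)
          else (nd, start_location, indel_width))
      (new_indel_dict, PySem.List.pyGetD indel_list 0 0, 1)
    match st with
    | (nd, start_location, indel_width) =>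
      let indel_list := nd.getD key []
      if 0 < indel_width ∧ indel_list.length = 0 then
        let start_location := calibrate_start_location start_location nd key
        create_add_indel nd key (start_location - 1) indel_width
      else if (PySem.List.pyGetD indel_list (-1) (0, "")).1 ≠ start_location then
        let start_location := calibrate_start_location start_location nd key
        create_add_indel nd key (start_location - 1) indel_width
      else nd

def pvSumLen (out : List (Int × String)) : Int :=
  out.foldl (fun acc indel => acc + PySem.Str.len indel.2) 0

theorem pvLen_dash (w : Int) (hw : 1 ≤ w) :
    PySem.Str.len (String.ofList (PySem.List.pyRepeat ['-'] w)) = w := by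
  rw [PySem.Str.len_eq, PySem.List.pyRepeat_singleton]
  have h : (String.ofList (List.replicate w.toNat '-')).toList = List.replicate w.toNat '-' :=
    Eq.symm (String.ofList_eq.mp rfl)
  rw [h, List.length_replicate]
  omega

theorem pvSumLen_append (out : List (Int × String)) (e : Int × String) :
    pvSumLen (out ++ [e]) = pvSumLen out + PySem.Str.len e.2 := by
  simp [pvSumLen, List.foldl_append]

theorem pvCalib (s : Int) (nd : PySem.Dict String (List (Int × String))) (key : String) (out : List (Int × String)) :
    calibrate_start_location s (nd.insert key out) key = s - pvSumLen out := by
  simp [calibrate_start_location, PySem.Dict.getD_insert_self, pvSumLen]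

theorem pvCreate (nd : PySem.Dict String (List (Int × String))) (key : String) (out : List (Int × String)) (a w : Int) :
    create_add_indel (nd.insert key out) key a w
      = nd.insert key (out ++ [(a, String.ofList (PySem.List.pyRepeat ['-'] w))]) := by
  simp [create_add_indel, PySem.Dict.modify, PySem.Dict.getD_insert_self,
    PySem.Dict.insert_insert_self]

-- The simulation: A's dict-carrying inner loop tracks B's pure loop, with B's running sum c
-- equal to the total length of the strings emitted so far (what calibrate_start_location rescans).
theorem pvSim (key : String) (xs : List Int) (nd : PySem.Dict String (List (Int × String))) :
    ∀ (l : List Int) (s w c : Int) (out : List (Int × String)), 1 ≤ w → c = pvSumLen out →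
      l.foldl (pvStepA key xs) (nd.insert key out, s, w)
          = (nd.insert key (l.foldl (pvStepB xs) (s, w, c, out)).2.2.2,
             (l.foldl (pvStepB xs) (s, w, c, out)).1,
             (l.foldl (pvStepB xs) (s, w, c, out)).2.1)
        ∧ 1 ≤ (l.foldl (pvStepB xs) (s, w, c, out)).2.1
        ∧ (l.foldl (pvStepB xs) (s, w, c, out)).2.2.1
            = pvSumLen (l.foldl (pvStepB xs) (s, w, c, out)).2.2.2 := by
  intro l
  induction l with
  | nil => intro s w c out hw hc; exact ⟨rfl, hw, hc⟩
  | cons i l ih =>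
    intro s w c out hw hc
    simp only [List.foldl_cons]
    by_cases hdiff : PySem.List.pyGetD xs (i + 1) 0 - PySem.List.pyGetD xs i 0 = 1
    · simp only [pvStepA, pvStepB, if_pos hdiff]
      exact ih _ _ _ _ (by omega) hc
    · have hw0 : (0 : Int) < w := by omega
      simp only [pvStepA, pvStepB, if_neg hdiff, if_pos hw0]
      rw [pvCalib, pvCreate, ← hc]
      exact ih _ _ _ _ le_rfl
        (by rw [pvSumLen_append, ← hc, pvLen_dash w hw])

theorem pvGA_eq (d : PySem.Dict String (List Int)) (nd : PySem.Dict String (List (Int × String))) (key : String) :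
    pvGA d nd key = nd.insert key (pvOutB (d.getD key [])) := by
  unfold pvGA pvOutB
  generalize d.getD key [] = xs
  by_cases h0 : xs.length = 0
  · simp [h0]
  · rw [if_neg h0, if_neg h0]
    have hn : 1 ≤ xs.length := Nat.one_le_iff_ne_zero.mpr h0
    have hn' : (1 : Int) ≤ (xs.length : Int) := by exact_mod_cast hn
    rw [PySem.List.enumerate_eq_map_pyRange xs 0, List.foldl_map]
    have hsplit : PySem.List.pyRange 0 (PySem.List.len xs) 1
        = PySem.List.pyRange 0 ((xs.length : Int) - 1) 1 ++ [(xs.length : Int) - 1] := by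
      have h := PySem.List.pyRange_one_succ_right (a := 0) (b := (xs.length : Int) - 1) (by omega)
      have h2 : (xs.length : Int) - 1 + 1 = PySem.List.len xs := by
        simp [PySem.List.len]
      rw [h2] at h
      exact h
    rw [hsplit, List.foldl_append]
    have hcongr :
        List.foldl
          (fun st j =>
            (fun (st : PySem.Dict String (List (Int × String)) × Int × Int) p =>
              match st, p with
              | (nd, start_location, indel_width), (index, location) =>
                if (xs.length : Int) ≤ index + 1 then (nd, start_location, indel_width)
                else if PySem.List.pyGetD xs (index + 1) 0 - PySem.List.pyGetD xs index 0 = 1 then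
                  (nd, (if indel_width = 1 then location else start_location), indel_width + 1)
                else if 0 < indel_width then
                  let start_location := if indel_width = 1 then location else start_location
                  let start_location := calibrate_start_location start_location nd key
                  (create_add_indel nd key (start_location - 1) indel_width, start_location, 1)
                else (nd, start_location, indel_width))
              st (j, PySem.List.pyGetD xs j 0))
          (nd.insert key [], PySem.List.pyGetD xs 0 0, 1)
          (PySem.List.pyRange 0 ((xs.length : Int) - 1) 1)
        = List.foldl (pvStepA key xs)
            (nd.insert key [], PySem.List.pyGetD xs 0 0, 1)
            (PySem.List.pyRange 0 ((xs.length : Int) - 1) 1) := by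
      apply PySem.List.foldl_congr_mem
      intro acc x hx
      rw [PySem.List.mem_pyRange_one] at hx
      obtain ⟨acc1, acc2, acc3⟩ := acc
      have hx1 : ¬ ((xs.length : Int) ≤ x + 1) := by omega
      simp only [pvStepA, if_neg hx1]
    rw [hcongr]
    obtain ⟨heq, hw', hc'⟩ :=
      pvSim key xs nd (PySem.List.pyRange 0 ((xs.length : Int) - 1) 1)
        (PySem.List.pyGetD xs 0 0) 1 0 [] le_rfl (by simp [pvSumLen])
    rw [heq]
    simp only [List.foldl_cons, List.foldl_nil]
    have hguard : ((xs.length : Int) ≤ (xs.length : Int) - 1 + 1) := by omega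
    rw [if_pos hguard]
    -- final emission branches
    set st := (PySem.List.pyRange 0 ((xs.length : Int) - 1) 1).foldl (pvStepB xs)
      (PySem.List.pyGetD xs 0 0, 1, 0, []) with hst
    obtain ⟨s', w', c', out'⟩ := st
    simp only at hw' hc' ⊢
    rw [PySem.Dict.getD_insert_self]
    by_cases hlen : out'.length = 0
    · rw [if_pos ⟨by omega, hlen⟩, if_pos (Or.inl hlen)]
      rw [pvCalib, pvCreate, hc']
    · rw [if_neg (by simp [hlen])]
      by_cases hlast : (PySem.List.pyGetD out' (-1) (0, "")).1 ≠ s'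
      · rw [if_pos hlast, if_pos (Or.inr hlast)]
        rw [pvCalib, pvCreate, hc']
      · rw [if_neg hlast, if_neg (by simp [hlen, hlast])]

theorem pvA_items (l : List (String × List Int)) :
    combine_indels l
      = (PySem.Dict.ofList l).keys.map
          (fun k => (k, pvOutB ((PySem.Dict.ofList l).getD k []))) := by
  show ((PySem.Dict.ofList l).keys.foldl (pvGA (PySem.Dict.ofList l)) PySem.Dict.empty).items = _
  rw [PySem.List.foldl_congr_mem _ _
    (fun nd k => nd.insert k (pvOutB ((PySem.Dict.ofList l).getD k []))) _
    (fun acc x _ => pvGA_eq (PySem.Dict.ofList l) acc x)]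
  have h := PySem.Dict.items_foldl_insert_fresh (PySem.Dict.ofList l).keys (fun a => a)
    (fun k => pvOutB ((PySem.Dict.ofList l).getD k [])) PySem.Dict.empty
    (by intro a _; simp [PySem.Dict.contains_empty])
    (by simp)
  simp at h
  exact h

theorem pvB_items (l : List (String × List Int)) :
    combine_indels_alt l
      = (PySem.Dict.ofList l).items.map (fun kv => (kv.1, pvOutB kv.2)) := by
  show ((PySem.Dict.ofList l).items.foldl
      (fun result kv => result.insert kv.1 (pvOutB kv.2)) PySem.Dict.empty).items = _
  have h := PySem.Dict.items_foldl_insert_fresh (PySem.Dict.ofList l).items (fun kv => kv.1)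
    (fun kv => pvOutB kv.2) PySem.Dict.empty
    (by intro a _; simp [PySem.Dict.contains_empty])
    (PySem.Dict.nodup_keys_ofList l)
  simp at h
  exact h

-- ===== VERDICT (by name: the statement is the Claim_ definition above) =====
theorem combine_indels_spec : Claim_equal_combine_indels := by
  intro l _
  unfold Spec_combine_indels
  rw [pvA_items, pvB_items,
    PySem.Dict.items_eq_map_keys (PySem.Dict.ofList l) (PySem.Dict.nodup_keys_ofList l) [],
    List.map_map]
  rfl
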